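-- pv_equiv track=rewrite | github.com/stevenxchung/lc-library | NeetCode +75/15 - Greedy/763-partition-labels.py | reference
-- ===== SOURCE A (Python) =====
-- from typing import List
--
-- def reference(s: str) -> List[int]:
--     count = {}
--     res = []
--     i, length = 0, len(s)
--     for j in range(length):
--         c = s[j]
--         count[c] = j
--
--     curLen = 0
--     goal = 0
--     while i < length:
--         c = s[i]
--         goal = max(goal, count[c])
--         curLen += 1
--
--         if goal == i:
--             res.append(curLen)
--             curLen = 0
--         i += 1
--     return res
-- ===== SOURCE B (Python) =====
-- from typing import List
--
-- def reference(s: str) -> List[int]: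
--     last = {c: j for j, c in enumerate(s)}
--     res = []
--     i, n = 0, len(s)
--     while i < n:
--         e = last[s[i]]
--         j = i
--         while j < e:
--             j += 1
--             e = max(e, last[s[j]])
--         res.append(e - i + 1)
--         i = e + 1
--     return res
-- ===== Notes on version B (the rewrite author's own statement) =====
-- stated objective: alternative
-- what changed: A makes one flat index scan carrying a running goal and a curLen counter across the whole string; B builds the last-occurrence dict with a comprehension and then processes the string one partition at a time (outer loop per chunk, inner loop expanding the chunk end), jumping to end+1 and emitting each length arithmetically as end-start+1.
import Mathlib
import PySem

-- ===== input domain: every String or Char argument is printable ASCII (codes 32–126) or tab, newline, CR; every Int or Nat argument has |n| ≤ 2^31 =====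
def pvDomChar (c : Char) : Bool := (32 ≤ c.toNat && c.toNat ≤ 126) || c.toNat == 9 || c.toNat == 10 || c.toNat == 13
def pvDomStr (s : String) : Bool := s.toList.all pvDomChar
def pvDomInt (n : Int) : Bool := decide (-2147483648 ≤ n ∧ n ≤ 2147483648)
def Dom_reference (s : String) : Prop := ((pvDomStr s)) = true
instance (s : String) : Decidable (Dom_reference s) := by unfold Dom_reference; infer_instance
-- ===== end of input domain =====

-- B re-implements A's flat goal/curLen scan as a per-partition decomposition (last-occurrence
-- dict built by a comprehension, then an outer loop per chunk with an inner end-expanding loop);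
-- same cost, different structure ("alternative").

-- ===== PORT A =====
-- for j in range(length): count[s[j]] = j   (s[j] as getD: j is always in range here)
def refCount (cs : List Char) : PySem.Dict Char Int :=
  (PySem.List.pyRange 0 cs.length 1).foldl
    (fun d j => d.insert (PySem.List.pyGetD cs j ' ') j) PySem.Dict.empty

-- the while loop; count[c] is always present, so getD's default is never used
def refLoop (cs : List Char) (count : PySem.Dict Char Int) :
    Nat → Int → Int → List Int → List Int
  | i, goal, curLen, res =>
    if _h : i < cs.length then
      let c := cs.getD i ' '
      let goal' := max goal (count.getD c 0)
      if goal' = (i : Int) then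
        refLoop cs count (i+1) goal' 0 (res ++ [curLen + 1])
      else
        refLoop cs count (i+1) goal' (curLen + 1) res
    else res
  termination_by i => cs.length - i

def reference (s : String) : List Int :=
  refLoop s.toList (refCount s.toList) 0 0 0 []

-- ===== PORT B =====
-- last = {c: j for j, c in enumerate(s)}
def lastMap (cs : List Char) : PySem.Dict Char Int :=
  (PySem.List.enumerate cs 0).foldl (fun d p => d.insert p.2 p.1) PySem.Dict.empty

-- inner: while j < e: j += 1; e = max(e, last[s[j]])
-- (the extra 'j + 1 < cs.length' conjunct is a totality guard only; in every reachable
-- state e < cs.length and j < e imply it, so it changes nothing)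
def bInner (cs : List Char) (last : PySem.Dict Char Int) : Nat → Int → Int
  | j, e =>
    if _h : (j : Int) < e ∧ j + 1 < cs.length then
      bInner cs last (j+1) (max e (last.getD (cs.getD (j+1) ' ') 0))
    else e
  termination_by j _ => cs.length - j

-- outer: while i < n: e = expand; res.append(e - i + 1); i = e + 1
-- (the 'i < e.toNat + 1' check is a totality guard only; e ≥ i in every reachable state)
def bChunks (cs : List Char) (last : PySem.Dict Char Int) (i : Nat) : List Int :=
  if _h : i < cs.length then
    let e := bInner cs last i (last.getD (cs.getD i ' ') 0)
    if _h2 : i < e.toNat + 1 then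
      (e - i + 1) :: bChunks cs last (e.toNat + 1)
    else [e - i + 1]
  else []
  termination_by cs.length - i
  decreasing_by omega

def reference_alt (s : String) : List Int :=
  bChunks s.toList (lastMap s.toList) 0

-- ===== PRECONDITION & SPEC =====
def Spec_reference (s : String) (out : List Int) : Prop := out = reference_alt s
instance (s : String) (out : List Int) : Decidable (Spec_reference s out) := by unfold Spec_reference; infer_instance

-- ===== CLAIM (what is proved, stated in full; the proofs are below) =====
def Claim_equal_reference : Prop := ∀ (s : String), Dom_reference s → Spec_reference s (reference s)

-- ===== LEMMAS AND PROOFS =====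

-- the two dict-building passes produce the same dict
lemma refCount_eq (cs : List Char) : refCount cs = lastMap cs := by
  unfold refCount lastMap
  rw [PySem.List.enumerate_eq_map_pyRange (d := ' '), List.foldl_map]
  simp only [PySem.List.len_eq]

-- every key looked up through a position has a value between that position and the length
lemma lastMap_bounds (cs : List Char) (k : Nat) (hk : k < cs.length) :
    (k : Int) ≤ (lastMap cs).getD (cs.getD k ' ') 0 ∧
    (lastMap cs).getD (cs.getD k ' ') 0 < (cs.length : Int) := by
  induction cs using List.reverseRecOn generalizing k with
  | nil => simp at hk
  | append_singleton xs x ih =>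
    have hlast : lastMap (xs ++ [x]) = (lastMap xs).insert x (xs.length : Int) := by
      unfold lastMap
      rw [PySem.List.enumerate_append, List.foldl_append]
      simp [PySem.List.enumerate_cons, PySem.List.enumerate_nil]
    rw [hlast]
    simp only [List.length_append, List.length_singleton] at hk ⊢
    by_cases hk' : k < xs.length
    · have hget : (xs ++ [x]).getD k ' ' = xs.getD k ' ' := by
        simp [List.getD_eq_getElem?_getD, List.getElem?_append_left hk']
      rw [hget, PySem.Dict.getD_insert]
      rcases ih k hk' with ⟨h1, h2⟩
      by_cases hx : xs.getD k ' ' = x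
      · rw [if_pos hx]; constructor <;> (push_cast; omega)
      · rw [if_neg hx]
        refine ⟨h1, ?_⟩
        push_cast
        omega
    · have hkk : k = xs.length := by omega
      subst hkk
      have hget : (xs ++ [x]).getD xs.length ' ' = x := by
        simp [List.getD_eq_getElem?_getD]
      rw [hget, PySem.Dict.getD_insert]
      simp

lemma bInner_le (cs : List Char) (d : PySem.Dict Char Int) (j : Nat) (e : Int) :
    e ≤ bInner cs d j e := by
  fun_induction bInner with
  | case1 j e h ih => exact le_trans (le_max_left _ _) ih
  | case2 j e h => exact le_refl _

lemma refLoop_step (cs : List Char) (d : PySem.Dict Char Int) {i : Nat}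
    (h : i < cs.length) (g c : Int) (res : List Int) :
    refLoop cs d i g c res =
      if max g (d.getD (cs.getD i ' ') 0) = (i : Int)
      then refLoop cs d (i+1) (max g (d.getD (cs.getD i ' ') 0)) 0 (res ++ [c + 1])
      else refLoop cs d (i+1) (max g (d.getD (cs.getD i ' ') 0)) (c + 1) res := by
  rw [refLoop, dif_pos h]

lemma refLoop_end (cs : List Char) (d : PySem.Dict Char Int) {i : Nat}
    (h : ¬ i < cs.length) (g c : Int) (res : List Int) :
    refLoop cs d i g c res = res := by
  rw [refLoop, dif_neg h]

lemma bInner_step (cs : List Char) (d : PySem.Dict Char Int) {j : Nat} {e : Int}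
    (h : (j : Int) < e ∧ j + 1 < cs.length) :
    bInner cs d j e = bInner cs d (j+1) (max e (d.getD (cs.getD (j+1) ' ') 0)) := by
  rw [bInner, dif_pos h]

lemma bInner_end (cs : List Char) (d : PySem.Dict Char Int) {j : Nat} {e : Int}
    (h : ¬ ((j : Int) < e ∧ j + 1 < cs.length)) :
    bInner cs d j e = e := by
  rw [bInner, dif_neg h]

lemma bChunks_step (cs : List Char) (d : PySem.Dict Char Int) {i : Nat}
    (h : i < cs.length) :
    bChunks cs d i =
      if i < (bInner cs d i (d.getD (cs.getD i ' ') 0)).toNat + 1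
      then (bInner cs d i (d.getD (cs.getD i ' ') 0) - i + 1)
            :: bChunks cs d ((bInner cs d i (d.getD (cs.getD i ' ') 0)).toNat + 1)
      else [bInner cs d i (d.getD (cs.getD i ' ') 0) - i + 1] := by
  rw [bChunks, dif_pos h]
  rfl

lemma bChunks_end (cs : List Char) (d : PySem.Dict Char Int) {i : Nat}
    (h : ¬ i < cs.length) : bChunks cs d i = [] := by
  rw [bChunks, dif_neg h]

-- combined simulation: A's loop mid-chunk (first component) and at chunk start (second)
lemma sim (cs : List Char) (m : Nat) :
    (∀ (j : Nat) (e c : Int) (res : List Int), 2*(cs.length - j) ≤ m → j < cs.length →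
      (j : Int) ≤ e → e < (cs.length : Int) →
      (if e = (j : Int) then refLoop cs (lastMap cs) (j+1) e 0 (res ++ [c])
       else refLoop cs (lastMap cs) (j+1) e c res)
        = res ++ (c + (bInner cs (lastMap cs) j e - (j : Int)))
              :: bChunks cs (lastMap cs) ((bInner cs (lastMap cs) j e).toNat + 1))
  ∧ (∀ (i : Nat) (g : Int) (res : List Int), 2*(cs.length - i) + 1 ≤ m → g ≤ (i : Int) →
      refLoop cs (lastMap cs) i g 0 res = res ++ bChunks cs (lastMap cs) i) := by
  induction m using Nat.strong_induction_on with
  | _ m IH =>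
  constructor
  · -- mid-chunk: A from position j+1 with goal e equals closing the chunk at bInner j e
    intro j e c res hm hj hje hel
    by_cases heq : e = (j : Int)
    · rw [if_pos heq]
      have hbi : bInner cs (lastMap cs) j e = e := by
        apply bInner_end
        rintro ⟨h1, _⟩
        omega
      have hO := (IH (2*(cs.length - (j+1)) + 1) (by omega)).2 (j+1) e (res ++ [c])
        (by omega) (by omega)
      rw [hbi, hO, heq]
      simp
    · -- j < e : A takes one more step inside the chunk, matching one bInner step
      have hje' : (j : Int) < e := lt_of_le_of_ne hje (Ne.symm heq)
      have hjl : j + 1 < cs.length := by omega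
      obtain ⟨hF1, hF2⟩ := lastMap_bounds cs (j+1) hjl
      rw [if_neg heq, refLoop_step cs (lastMap cs) hjl]
      have hK := (IH (2*(cs.length - (j+1))) (by omega)).1 (j+1)
        (max e ((lastMap cs).getD (cs.getD (j+1) ' ') 0)) (c+1) res
        (by omega) hjl (by push_cast at hF1 ⊢; omega) (by omega)
      rw [hK, bInner_step cs (lastMap cs) ⟨hje', by exact_mod_cast hjl⟩]
      have harith : c + 1 + (bInner cs (lastMap cs) (j+1)
            (max e ((lastMap cs).getD (cs.getD (j+1) ' ') 0)) - ((j:Int) + 1))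
          = c + (bInner cs (lastMap cs) (j+1)
            (max e ((lastMap cs).getD (cs.getD (j+1) ' ') 0)) - (j:Int)) := by ring
      push_cast
      rw [harith]
  · -- chunk start: curLen = 0 and goal ≤ i
    intro i g res hm hg
    by_cases hi : i < cs.length
    · obtain ⟨hF1, hF2⟩ := lastMap_bounds cs i hi
      rw [refLoop_step cs (lastMap cs) hi,
          max_eq_right (le_trans hg hF1)]
      have hK := (IH (2*(cs.length - i)) (by omega)).1 i
        ((lastMap cs).getD (cs.getD i ' ') 0) (0+1) res (by omega) hi hF1 hF2
      rw [hK, bChunks_step cs (lastMap cs) hi]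
      have hle : (i : Int) ≤ bInner cs (lastMap cs) i ((lastMap cs).getD (cs.getD i ' ') 0) :=
        le_trans hF1 (bInner_le _ _ _ _)
      rw [if_pos (by omega)]
      have harith : 0 + 1 + (bInner cs (lastMap cs) i ((lastMap cs).getD (cs.getD i ' ') 0) - (i:Int))
          = bInner cs (lastMap cs) i ((lastMap cs).getD (cs.getD i ' ') 0) - (i:Int) + 1 := by ring
      rw [harith]
    · rw [refLoop_end cs (lastMap cs) hi, bChunks_end cs (lastMap cs) hi]
      simp

-- ===== VERDICT (by name: the statement is the Claim_ definition above) =====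
theorem reference_spec : Claim_equal_reference := by
  intro s _
  unfold Spec_reference reference reference_alt
  rw [refCount_eq]
  simpa using (sim s.toList (2 * s.toList.length + 1)).2 0 0 [] (by omega) (by omega)
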